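-- pv_equiv track=rewrite | github.com/Aleks-Data/HW-Python | Film_searcher/search_engine.py | find_documents
-- ===== SOURCE A (Python) =====
-- def parse_query(text: str, stop_words: set[str]) -> set[str]:
--     words = set(text.lower().split())
--     cleaned_words = words - stop_words
--
--     return cleaned_words
--
-- def match_document(document_words: set[str], query_words: set[str]) -> int:
--     document_words_lower = {word.lower() for word in document_words}
--     return len(document_words_lower.intersection(query_words))
--
-- def find_documents(documents: list[tuple[int, set[str]]], stop_words: set[str], query: str) -> list[tuple[int, int]]:
--     query_no_stop_words = parse_query(query, stop_words)
--     results = []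
--
--     for doc_id, document in documents:
--         relevance = match_document(document, query_no_stop_words)
--         if relevance > 0:
--             results.append((doc_id, relevance))
--
--     if results:
--         results.sort(key=lambda x: x[1], reverse=True)
--
--     return results
-- ===== SOURCE B (Python) =====
-- def find_documents(documents, stop_words, query):
--     query_words = set(query.lower().split()) - stop_words
--     scored = []
--     max_rel = 0
--     for doc_id, document in documents:
--         relevance = len({w.lower() for w in document} & query_words)
--         if relevance > 0:
--             scored.append((relevance, doc_id))
--             if relevance > max_rel:
--                 max_rel = relevance
--     buckets = {}
--     for relevance, doc_id in scored:
--         buckets.setdefault(relevance, []).append(doc_id)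
--     out = []
--     for r in range(1, max_rel + 1):
--         out = [(doc_id, r) for doc_id in buckets.get(r, [])] + out
--     return out
-- ===== Notes on version B (the rewrite author's own statement) =====
-- stated objective: alternative
-- what changed: A's stable reverse comparison sort of the scored documents is replaced by bucketing doc_ids into a dict keyed by relevance during the scan and emitting the buckets from the maximum relevance down to 1 (a counting/bucket ordering over the bounded integer relevance), so no comparison sort is performed.
import Mathlib
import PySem

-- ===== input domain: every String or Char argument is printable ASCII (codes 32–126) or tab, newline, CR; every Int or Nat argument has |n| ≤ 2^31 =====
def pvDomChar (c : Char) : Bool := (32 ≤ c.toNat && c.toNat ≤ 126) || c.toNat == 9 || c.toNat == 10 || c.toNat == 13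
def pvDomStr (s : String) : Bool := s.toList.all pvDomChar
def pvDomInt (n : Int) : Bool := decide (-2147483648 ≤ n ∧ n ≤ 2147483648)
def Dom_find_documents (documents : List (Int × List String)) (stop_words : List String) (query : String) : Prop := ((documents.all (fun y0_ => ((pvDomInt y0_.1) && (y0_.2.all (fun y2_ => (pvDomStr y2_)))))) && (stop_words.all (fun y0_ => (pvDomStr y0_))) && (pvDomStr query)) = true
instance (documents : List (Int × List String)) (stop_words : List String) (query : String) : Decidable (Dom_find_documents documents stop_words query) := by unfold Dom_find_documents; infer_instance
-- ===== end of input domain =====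

-- B replaces A's comparison sort of the scored documents by relevance buckets (a dict keyed by
-- relevance, emitted from the maximum relevance down to 1); alternative decomposition, same result.


-- ===== PORT A =====
def parse_query (text : String) (stop_words : List String) : PySem.Set String :=
  PySem.Set.diff (PySem.Set.ofList (PySem.Str.split₀ (PySem.Str.lower text))) stop_words

def match_document (document_words : List String) (query_words : PySem.Set String) : Int :=
  PySem.Set.len (PySem.Set.inter (PySem.Set.ofList (document_words.map PySem.Str.lower)) query_words)

def find_documents (documents : List (Int × List String)) (stop_words : List String) (query : String) : List (Int × Int) :=
  let query_no_stop_words := parse_query query stop_words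
  let results := documents.foldl (fun results d =>
      let relevance := match_document d.2 query_no_stop_words
      if relevance > 0 then results ++ [(d.1, relevance)] else results) []
  if results = [] then results else PySem.List.sorted results (fun x => x.2) true

-- ===== PORT B =====
def find_documents_alt (documents : List (Int × List String)) (stop_words : List String) (query : String) : List (Int × Int) :=
  let query_words : PySem.Set String :=
    PySem.Set.diff (PySem.Set.ofList (PySem.Str.split₀ (PySem.Str.lower query))) stop_words
  let st := documents.foldl (fun (st : List (Int × Int) × Int) d =>
      let relevance : Int := PySem.Set.len (PySem.Set.inter (PySem.Set.ofList (d.2.map PySem.Str.lower)) query_words)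
      if relevance > 0 then
        (st.1 ++ [(relevance, d.1)], if relevance > st.2 then relevance else st.2)
      else st) ([], 0)
  let buckets : PySem.Dict Int (List Int) :=
    st.1.foldl (fun b p => b.modify p.1 [] (· ++ [p.2])) PySem.Dict.empty
  (PySem.List.pyRange 1 (st.2 + 1) 1).foldl
    (fun out r => (buckets.getD r []).map (fun doc_id => (doc_id, r)) ++ out) []

-- ===== PRECONDITION & SPEC =====
-- (A is total: no Pre_ needed)
def Spec_find_documents (documents : List (Int × List String)) (stop_words : List String) (query : String) (out : List (Int × Int)) : Prop := out = find_documents_alt documents stop_words query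
instance (documents : List (Int × List String)) (stop_words : List String) (query : String) (out : List (Int × Int)) : Decidable (Spec_find_documents documents stop_words query out) := by unfold Spec_find_documents; infer_instance

-- ===== CLAIM (what is proved, stated in full; the proofs are below) =====
def Claim_equal_find_documents : Prop := ∀ (documents : List (Int × List String)) (stop_words : List String) (query : String), Dom_find_documents documents stop_words query → Spec_find_documents documents stop_words query (find_documents documents stop_words query)

-- ===== LEMMAS AND PROOFS =====

-- relevance of a document against a (parsed) query set, and the two ports' loop bodies
def pvRel (q : PySem.Set String) (ws : List String) : Int :=
  PySem.Set.len (PySem.Set.inter (PySem.Set.ofList (ws.map PySem.Str.lower)) q)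

def pvFA (q : PySem.Set String) (results : List (Int × Int)) (d : Int × List String) : List (Int × Int) :=
  let relevance := pvRel q d.2
  if relevance > 0 then results ++ [(d.1, relevance)] else results

def pvFB (q : PySem.Set String) (st : List (Int × Int) × Int) (d : Int × List String) : List (Int × Int) × Int :=
  let relevance := pvRel q d.2
  if relevance > 0 then
    (st.1 ++ [(relevance, d.1)], if relevance > st.2 then relevance else st.2)
  else st

def pvSw (x : Int × Int) : Int × Int := (x.2, x.1)

-- B's first loop computes A's result list with the pairs swapped
lemma pvB_fst (q : PySem.Set String) (docs : List (Int × List String)) :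
    ∀ (acc : List (Int × Int)) (m : Int),
      (docs.foldl (pvFB q) (acc.map pvSw, m)).1 = (docs.foldl (pvFA q) acc).map pvSw := by
  induction docs with
  | nil => intro acc m; rfl
  | cons d docs ih =>
    intro acc m
    by_cases h : pvRel q d.2 > 0
    · have : pvFB q (acc.map pvSw, m) d
          = ((acc ++ [(d.1, pvRel q d.2)]).map pvSw, if pvRel q d.2 > m then pvRel q d.2 else m) := by
        simp [pvFB, h, pvSw]
      simp only [List.foldl_cons, this, ih, pvFA, h, if_true]
    · simp only [List.foldl_cons, pvFB, pvFA, if_neg h, ih]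

-- B's running maximum bounds every stored relevance
lemma pvB_snd_bound (q : PySem.Set String) (docs : List (Int × List String)) :
    ∀ (acc : List (Int × Int)) (m : Int), (∀ p ∈ acc, p.1 ≤ m) →
      (∀ p ∈ (docs.foldl (pvFB q) (acc, m)).1, p.1 ≤ (docs.foldl (pvFB q) (acc, m)).2) ∧
        m ≤ (docs.foldl (pvFB q) (acc, m)).2 := by
  induction docs with
  | nil => intro acc m h; exact ⟨h, le_refl m⟩
  | cons d docs ih =>
    intro acc m h
    by_cases hr : pvRel q d.2 > 0
    · have hstep : pvFB q (acc, m) d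
          = (acc ++ [(pvRel q d.2, d.1)], if pvRel q d.2 > m then pvRel q d.2 else m) := by
        simp [pvFB, hr]
      simp only [List.foldl_cons, hstep]
      have hmono : m ≤ (if pvRel q d.2 > m then pvRel q d.2 else m) := by split <;> omega
      have := ih (acc ++ [(pvRel q d.2, d.1)]) (if pvRel q d.2 > m then pvRel q d.2 else m)
        (by intro p hp
            rcases List.mem_append.1 hp with hp | hp
            · exact le_trans (h p hp) hmono
            · simp at hp; subst hp; simp; split <;> omega)
      exact ⟨this.1, le_trans hmono this.2⟩
    · simp only [List.foldl_cons, pvFB, if_neg hr]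
      exact ih acc m h

-- every relevance A stores is at least 1
lemma pvA_pos (q : PySem.Set String) (docs : List (Int × List String)) :
    ∀ (acc : List (Int × Int)), (∀ x ∈ acc, 1 ≤ x.2) →
      ∀ x ∈ docs.foldl (pvFA q) acc, 1 ≤ x.2 := by
  induction docs with
  | nil => intro acc h; exact h
  | cons d docs ih =>
    intro acc h
    by_cases hr : pvRel q d.2 > 0
    · simp only [List.foldl_cons, pvFA, if_pos hr]
      exact ih _ (by intro x hx
                     rcases List.mem_append.1 hx with hx | hx
                     · exact h x hx
                     · simp at hx; subst hx; simpa using hr)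
    · simp only [List.foldl_cons, pvFA, if_neg hr]
      exact ih acc h

-- a left fold that prepends blocks is flatMap over the reversed index list
lemma pvFoldl_prepend {β : Type} (f : Int → List β) :
    ∀ (l : List Int) (acc : List β),
      l.foldl (fun out r => f r ++ out) acc = l.reverse.flatMap f ++ acc := by
  intro l
  induction l with
  | nil => simp
  | cons a l ih => intro acc; simp [List.foldl_cons, ih]

-- restoring the relevance component to a bucket's doc_ids gives back the filtered pairs
lemma pvMap_filter (r : Int) (l : List (Int × Int)) :
    (l.filter (fun x => x.2 == r)).map (fun x => (x.1, r)) = l.filter (fun x => x.2 == r) := by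
  induction l with
  | nil => rfl
  | cons a l ih =>
    by_cases h : a.2 = r
    · simp [h, ih]
      exact (Prod.ext_iff.2 ⟨rfl, h.symm⟩)
    · simp [h, ih]

-- insertion skips a prefix it is not ordered before
lemma pvInsertBy_append (before : Int × Int → Int × Int → Bool) (x : Int × Int) :
    ∀ (A B : List (Int × Int)), (∀ a ∈ A, before x a = false) →
    PySem.List.insertBy before x (A ++ B) = A ++ PySem.List.insertBy before x B := by
  intro A
  induction A with
  | nil => simp
  | cons a A ih =>
    intro B h
    have ha := h a (by simp)
    simp [PySem.List.insertBy, ha, ih B (fun y hy => h y (by simp [hy]))]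

-- MAIN: the stable reverse insertion sort by an integer key is the concatenation of the
-- key buckets taken along any strictly decreasing key list covering all keys
lemma pvSorted_buckets (ks : List Int) (hks : ks.Pairwise (fun a b => b < a)) :
    ∀ (xs : List (Int × Int)), (∀ x ∈ xs, x.2 ∈ ks) →
      PySem.List.sorted xs (fun x => x.2) true
        = ks.flatMap (fun k => xs.filter (fun x => x.2 == k)) := by
  intro xs
  induction xs using List.reverseRecOn with
  | nil => simp [PySem.List.sorted_rev_eq_foldl_insertBy]
  | append_singleton xs a ih =>
    intro hmem
    have hmem' : ∀ x ∈ xs, x.2 ∈ ks := fun x hx => hmem x (by simp [hx])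
    have ha : a.2 ∈ ks := hmem a (by simp)
    obtain ⟨s, t, rfl⟩ := List.append_of_mem ha
    -- pairwise facts
    rw [List.pairwise_append] at hks
    obtain ⟨hs, ht', hst⟩ := hks
    rw [List.pairwise_cons] at ht'
    obtain ⟨hta, ht⟩ := ht'
    have hgt : ∀ k ∈ s, a.2 < k := fun k hk => hst k hk a.2 (by simp)
    -- LHS: one insertion into the sorted prefix
    have hL : PySem.List.sorted (xs ++ [a]) (fun x => x.2) true
        = PySem.List.insertBy (fun p q => decide (q.2 < p.2)) a
            (PySem.List.sorted xs (fun x => x.2) true) := by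
      rw [PySem.List.sorted_rev_eq_foldl_insertBy, PySem.List.sorted_rev_eq_foldl_insertBy,
        List.foldl_append]
      rfl
    rw [hL, ih hmem']
    set f := fun k => xs.filter (fun x : Int × Int => x.2 == k) with hf
    have hsplit : (s ++ a.2 :: t).flatMap f = s.flatMap f ++ (f a.2 ++ t.flatMap f) := by
      simp [List.flatMap_append]
    rw [hsplit]
    have h1 : ∀ b ∈ s.flatMap f ++ f a.2, (fun p q : Int × Int => decide (q.2 < p.2)) a b = false := by
      intro b hb
      rcases List.mem_append.1 hb with hb | hb
      · obtain ⟨k, hk, hbk⟩ := List.mem_flatMap.1 hb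
        have : b.2 = k := by simpa using (List.of_mem_filter hbk)
        simp only [decide_eq_false_iff_not, not_lt]
        exact le_of_lt (this ▸ hgt k hk)
      · have : b.2 = a.2 := by simpa using (List.of_mem_filter hb)
        simp [this]
    rw [← List.append_assoc, pvInsertBy_append _ _ _ _ h1]
    have h2 : PySem.List.insertBy (fun p q : Int × Int => decide (q.2 < p.2)) a (t.flatMap f)
        = a :: t.flatMap f := by
      cases hc : t.flatMap f with
      | nil => simp [PySem.List.insertBy]
      | cons c cs =>
        have hcmem : c ∈ t.flatMap f := by simp [hc]
        obtain ⟨k, hk, hck⟩ := List.mem_flatMap.1 hcmem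
        have hck2 : c.2 = k := by simpa using (List.of_mem_filter hck)
        have : c.2 < a.2 := hck2 ▸ hta k hk
        simp [PySem.List.insertBy, this]
    rw [h2]
    -- RHS
    have hnotmem_s : a.2 ∉ s := fun h => lt_irrefl _ (hgt _ h)
    have hnotmem_t : a.2 ∉ t := fun h => lt_irrefl _ (hta _ h)
    have hfs : ∀ k ∈ s, (xs ++ [a]).filter (fun x : Int × Int => x.2 == k) = f k := by
      intro k hk
      have : a.2 ≠ k := fun h => hnotmem_s (h ▸ hk)
      simp [hf, List.filter_append, this]
    have hft : ∀ k ∈ t, (xs ++ [a]).filter (fun x : Int × Int => x.2 == k) = f k := by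
      intro k hk
      have : a.2 ≠ k := fun h => hnotmem_t (h ▸ hk)
      simp [hf, List.filter_append, this]
    have hfa : (xs ++ [a]).filter (fun x : Int × Int => x.2 == a.2) = f a.2 ++ [a] := by
      simp [hf, List.filter_append]
    rw [List.flatMap_append, List.flatMap_cons]
    rw [List.flatMap_congr hfs, List.flatMap_congr hft, hfa]
    simp

-- ===== VERDICT (by name: the statement is the Claim_ definition above) =====
theorem find_documents_spec : Claim_equal_find_documents := by
  intro documents stop_words query _hdom
  unfold Spec_find_documents
  set q := parse_query query stop_words with hq
  have hA : find_documents documents stop_words query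
      = (if documents.foldl (pvFA q) [] = [] then documents.foldl (pvFA q) []
         else PySem.List.sorted (documents.foldl (pvFA q) []) (fun x => x.2) true) := rfl
  have hB : find_documents_alt documents stop_words query
      = (PySem.List.pyRange 1 ((documents.foldl (pvFB q) ([], 0)).2 + 1) 1).foldl
          (fun out r =>
            (((documents.foldl (pvFB q) ([], 0)).1.foldl
                (fun b p => b.modify p.1 [] (· ++ [p.2])) PySem.Dict.empty).getD r []).map
              (fun doc_id => (doc_id, r)) ++ out) [] := rfl
  rw [hA, hB]
  set R := documents.foldl (pvFA q) [] with hR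
  set st := documents.foldl (pvFB q) ([], 0) with hst
  have hfst : st.1 = R.map pvSw := by
    rw [hst, hR]
    simpa using pvB_fst q documents [] 0
  have hbounds := pvB_snd_bound q documents [] 0 (by simp)
  rw [← hst] at hbounds
  have hpos := pvA_pos q documents [] (by simp)
  rw [← hR] at hpos
  -- bucket content
  have hbucket : ∀ r : Int,
      ((st.1.foldl (fun b p => b.modify p.1 [] (· ++ [p.2])) PySem.Dict.empty).getD r []).map
          (fun doc_id => (doc_id, r))
        = R.filter (fun x => x.2 == r) := by
    intro r
    rw [PySem.Dict.getD_foldl_modify_append st.1 PySem.Dict.empty r]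
    rw [PySem.Dict.getD_empty, List.nil_append, hfst, List.filter_map]
    have hpred : ((fun p : Int × Int => p.1 == r) ∘ pvSw) = (fun x : Int × Int => x.2 == r) := by
      funext x; simp [pvSw]
    rw [hpred, List.map_map, List.map_map]
    have hcomp : (((fun doc_id => (doc_id, r)) ∘ (fun x : Int × Int => x.2)) ∘ pvSw)
        = (fun x : Int × Int => (x.1, r)) := by
      funext x; simp [pvSw, Function.comp]
    rw [hcomp, pvMap_filter]
  have hBfold :
      (PySem.List.pyRange 1 (st.2 + 1) 1).foldl
          (fun out r =>
            ((st.1.foldl (fun b p => b.modify p.1 [] (· ++ [p.2])) PySem.Dict.empty).getD r []).map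
              (fun doc_id => (doc_id, r)) ++ out) []
        = (PySem.List.pyRange 1 (st.2 + 1) 1).reverse.flatMap (fun r => R.filter (fun x => x.2 == r)) := by
    have h1 := pvFoldl_prepend (fun r =>
        ((st.1.foldl (fun b p => b.modify p.1 [] (· ++ [p.2])) PySem.Dict.empty).getD r []).map
          (fun doc_id => (doc_id, r))) (PySem.List.pyRange 1 (st.2 + 1) 1) []
    exact h1.trans (by rw [List.append_nil]; exact List.flatMap_congr (fun r _ => hbucket r))
  rw [hBfold]
  by_cases hRnil : R = []
  · rw [if_pos hRnil]
    rw [hRnil]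
    simp
  · rw [if_neg hRnil]
    apply pvSorted_buckets
    · rw [List.pairwise_reverse]
      exact PySem.List.pairwise_lt_pyRange_one 1 (st.2 + 1)
    · intro x hx
      rw [List.mem_reverse, PySem.List.mem_pyRange_one]
      refine ⟨hpos x hx, ?_⟩
      have hmem : pvSw x ∈ st.1 := by rw [hfst]; exact List.mem_map_of_mem hx
      have := hbounds.1 (pvSw x) hmem
      simp only [pvSw] at this
      omega
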